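-- pv_equiv track=rewrite | github.com/weeyangs/MACS30111 | se1-weeyangs/se1.py | num_divisible
-- ===== SOURCE A (Python) =====
-- def num_divisible(lb, ub, p, q):
--     """
--     How many numbers between lb and ub (inclusive) are divisible by p
--     or divisible by q, but not divisible by both p and q.
--     """
--
--     ### EXERCISE 4 -- YOUR CODE GOES HERE
--     # Replace the following line with your code.
--     # After running your code, variable n should contain the value
--     # we ask you to compute in this exercise.
--     n = 0
--     lowerlimit = lb
--     upperlimit = ub
--     if lb > ub:
--         lowerlimit = ub
--         upperlimit = lb
--     for i in range(lowerlimit,upperlimit + 1):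
--         if (i % q == 0 or i % p == 0) and not (i % q == 0 and i % p == 0):
--             n = n + 1
--
--     ### DO NOT MODIFY THE FOLLOWING LINE!
--     return n
-- ===== SOURCE B (Python) =====
-- def num_divisible(lb, ub, p, q):
--     """Closed-form inclusion-exclusion: count multiples of p, plus multiples of
--     q, minus twice the multiples of lcm(p, q), via floor division."""
--     a, b = (lb, ub) if lb <= ub else (ub, lb)
--     x, y = abs(p), abs(q)
--     while y:
--         x, y = y, x % y
--     lcm = abs(p * q) // x
--
--     def cnt(d):
--         return b // d - (a - 1) // d
--
--     return cnt(abs(p)) + cnt(abs(q)) - 2 * cnt(lcm)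
-- ===== Notes on version B (the rewrite author's own statement) =====
-- stated objective: faster
-- what changed: Replaced the per-integer scan of the whole [lb,ub] range by a closed-form inclusion-exclusion count using floor-division multiple counts (cnt(p)+cnt(q)-2*cnt(lcm(p,q))).
import Mathlib
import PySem

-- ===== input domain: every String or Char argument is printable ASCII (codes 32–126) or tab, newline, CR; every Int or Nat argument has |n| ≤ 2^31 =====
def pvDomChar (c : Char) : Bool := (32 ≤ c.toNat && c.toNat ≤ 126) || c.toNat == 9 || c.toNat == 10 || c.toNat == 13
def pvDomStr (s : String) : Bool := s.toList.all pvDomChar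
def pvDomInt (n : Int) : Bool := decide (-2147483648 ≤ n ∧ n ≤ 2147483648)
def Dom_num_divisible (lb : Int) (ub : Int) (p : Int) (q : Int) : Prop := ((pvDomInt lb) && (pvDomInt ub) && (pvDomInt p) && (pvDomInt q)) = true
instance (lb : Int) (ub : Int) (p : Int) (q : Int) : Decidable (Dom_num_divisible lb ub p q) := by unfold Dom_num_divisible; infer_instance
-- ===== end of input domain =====

-- B replaces A's per-integer scan of the whole range by a closed-form
-- inclusion-exclusion count (multiples of p + multiples of q - 2 * multiples of lcm(p,q))
-- computed with floor divisions and a Euclid gcd: asymptotically faster.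


-- ===== PORT A =====
def num_divisible (lb : Int) (ub : Int) (p : Int) (q : Int) : Int :=
  let n : Int := 0
  let lowerlimit := if lb > ub then ub else lb
  let upperlimit := if lb > ub then lb else ub
  (PySem.List.pyRange lowerlimit (upperlimit + 1) 1).foldl
    (fun n i =>
      if (PySem.Int.mod i q == 0 || PySem.Int.mod i p == 0) &&
         !(PySem.Int.mod i q == 0 && PySem.Int.mod i p == 0) then n + 1 else n) n

-- ===== PORT B =====
-- Source B's Euclid while-loop 'while y: x, y = y, x % y'; its operands are the
-- nonnegative abs(p), abs(q), so it is transcribed exactly as this Nat recursion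
-- (Python's % equals Nat.% on nonnegative operands).
def pyGcd : Nat → Nat → Nat
  | x, 0 => x
  | x, (y+1) => pyGcd (y+1) (x % (y+1))
termination_by x y => y
decreasing_by exact Nat.mod_lt _ (Nat.succ_pos y)

def num_divisible_alt (lb : Int) (ub : Int) (p : Int) (q : Int) : Int :=
  let a := if lb ≤ ub then lb else ub
  let b := if lb ≤ ub then ub else lb
  let g : Int := (pyGcd p.natAbs q.natAbs : Nat)
  let lcm := PySem.Int.floordiv |p * q| g
  let cnt : Int → Int := fun d => PySem.Int.floordiv b d - PySem.Int.floordiv (a - 1) d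
  cnt |p| + cnt |q| - 2 * cnt lcm

-- ===== PRECONDITION & SPEC =====
-- A evaluates i % p and i % q on a never-empty range, so it raises
-- ZeroDivisionError whenever p = 0 or q = 0; Pre_ excludes exactly those inputs.
def Pre_num_divisible (lb : Int) (ub : Int) (p : Int) (q : Int) : Prop := p ≠ 0 ∧ q ≠ 0
instance (lb : Int) (ub : Int) (p : Int) (q : Int) : Decidable (Pre_num_divisible lb ub p q) := by unfold Pre_num_divisible; infer_instance
def pvWitness_num_divisible : Int × Int × Int × Int := (0, 10, 2, 3)

def Spec_num_divisible (lb : Int) (ub : Int) (p : Int) (q : Int) (out : Int) : Prop := out = num_divisible_alt lb ub p q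
instance (lb : Int) (ub : Int) (p : Int) (q : Int) (out : Int) : Decidable (Spec_num_divisible lb ub p q out) := by unfold Spec_num_divisible; infer_instance

-- ===== CLAIM (what is proved, stated in full; the proofs are below) =====
def Claim_equal_num_divisible : Prop := ∀ (lb : Int) (ub : Int) (p : Int) (q : Int), Dom_num_divisible lb ub p q → Pre_num_divisible lb ub p q → Spec_num_divisible lb ub p q (num_divisible lb ub p q)

-- ===== LEMMAS AND PROOFS =====

lemma pyGcd_eq (x y : Nat) : pyGcd x y = Nat.gcd x y := by
  induction x, y using pyGcd.induct with
  | case1 x => simp [pyGcd]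
  | case2 x y ih =>
      rw [pyGcd, ih, Nat.gcd_comm, ← Nat.gcd_rec, Nat.gcd_comm]

-- closed-form "count of multiples up to x" combination used on both sides
def Fx (p q x : Int) : Int := x / |p| + x / |q| - 2 * (x / (Int.lcm p q : Int))

lemma lcm_cast_pos (p q : Int) (hp : p ≠ 0) (hq : q ≠ 0) : (0:Int) < (Int.lcm p q : Int) := by
  have h : Int.lcm p q ≠ 0 := by simp [Int.lcm_def, hp, hq]
  omega

lemma ediv_step (d x : Int) (hd : 0 < d) :
    x / d - (x - 1) / d = if d ∣ x then 1 else 0 := by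
  by_cases h : d ∣ x
  · obtain ⟨k, rfl⟩ := h
    have hA : d * k / d = k := Int.mul_ediv_cancel_left _ hd.ne'
    have hB : (d * k - 1) / d = k - 1 := by
      have h1 : d * k - 1 = (d - 1) + (k - 1) * d := by ring
      rw [h1, Int.add_mul_ediv_right _ _ hd.ne',
          Int.ediv_eq_zero_of_lt (a := d - 1) (b := d) (by omega) (by omega)]
      ring
    simp [hA, hB]
  · have hx := Int.ediv_add_emod x d
    have hr0 : 0 ≤ x % d := Int.emod_nonneg x hd.ne'
    have hrd : x % d < d := Int.emod_lt_of_pos x hd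
    have hrne : x % d ≠ 0 := fun h0 => h (Int.dvd_of_emod_eq_zero h0)
    have hB : (x - 1) / d = x / d := by
      have h1 : x - 1 = (x % d - 1) + (x / d) * d := by linarith [hx]
      rw [h1, Int.add_mul_ediv_right _ _ hd.ne',
          Int.ediv_eq_zero_of_lt (a := x % d - 1) (b := d) (by omega) (by omega)]
      ring
    simp [h, hB]

lemma point (p q i : Int) (hp : p ≠ 0) (hq : q ≠ 0) :
    (if (PySem.Int.mod i q == 0 || PySem.Int.mod i p == 0) &&
        !(PySem.Int.mod i q == 0 && PySem.Int.mod i p == 0) then (1:Int) else 0)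
      = Fx p q i - Fx p q (i - 1) := by
  have hP : (0:Int) < |p| := abs_pos.mpr hp
  have hQ : (0:Int) < |q| := abs_pos.mpr hq
  have hL := lcm_cast_pos p q hp hq
  have e1 := ediv_step |p| i hP
  have e2 := ediv_step |q| i hQ
  have e3 := ediv_step (Int.lcm p q : Int) i hL
  have hdvd : ((Int.lcm p q : Int) ∣ i) ↔ (p ∣ i ∧ q ∣ i) := lcm_dvd_iff
  unfold Fx
  by_cases h1 : p ∣ i <;> by_cases h2 : q ∣ i <;>
    simp [h1, h2, abs_dvd, hdvd, PySem.Int.mod_eq_zero_iff_dvd] at e1 e2 e3 ⊢ <;>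
    linarith

lemma foldA (p q a : Int) (hp : p ≠ 0) (hq : q ≠ 0) : ∀ (n : Nat) (init : Int),
    (PySem.List.pyRange a (a + (n:Int)) 1).foldl
      (fun n i =>
        if (PySem.Int.mod i q == 0 || PySem.Int.mod i p == 0) &&
           !(PySem.Int.mod i q == 0 && PySem.Int.mod i p == 0) then n + 1 else n) init
      = init + (Fx p q (a + (n:Int) - 1) - Fx p q (a - 1)) := by
  intro n
  induction n with
  | zero =>
      intro init
      rw [show a + ((0:Nat):Int) = a by simp, PySem.List.pyRange_one_eq_nil le_rfl]
      simp
  | succ n ih =>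
      intro init
      have hsplit : a + ((n+1 : Nat) : Int) = (a + (n:Int)) + 1 := by push_cast; ring
      rw [hsplit, PySem.List.pyRange_one_succ_right (by omega : a ≤ a + (n:Int)),
          List.foldl_append, ih]
      simp only [List.foldl_cons, List.foldl_nil]
      have hpt := point p q (a + (n:Int)) hp hq
      rw [show a + (n:Int) + 1 - 1 = a + (n:Int) by ring]
      split_ifs at hpt ⊢ <;> linarith

lemma Aside (p q a b : Int) (hp : p ≠ 0) (hq : q ≠ 0) (hab : a ≤ b) :
    (PySem.List.pyRange a (b + 1) 1).foldl
      (fun n i =>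
        if (PySem.Int.mod i q == 0 || PySem.Int.mod i p == 0) &&
           !(PySem.Int.mod i q == 0 && PySem.Int.mod i p == 0) then n + 1 else n) 0
      = Fx p q b - Fx p q (a - 1) := by
  obtain ⟨n, hn⟩ : ∃ n : Nat, b + 1 = a + (n:Int) := ⟨(b + 1 - a).toNat, by omega⟩
  have hb : b = a + (n:Int) - 1 := by omega
  rw [hn, hb, foldA p q a hp hq n 0]
  ring

lemma Bside (lb ub p q : Int) (hp : p ≠ 0) (hq : q ≠ 0) :
    num_divisible_alt lb ub p q
      = Fx p q (if lb ≤ ub then ub else lb) - Fx p q ((if lb ≤ ub then lb else ub) - 1) := by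
  have hP : (0:Int) < |p| := abs_pos.mpr hp
  have hQ : (0:Int) < |q| := abs_pos.mpr hq
  have hL := lcm_cast_pos p q hp hq
  have habs : |p * q| = ((p.natAbs * q.natAbs : Nat) : Int) := by
    push_cast
    rw [abs_mul, Int.abs_eq_natAbs, Int.abs_eq_natAbs]
  have hlcm : PySem.Int.floordiv |p * q| ((pyGcd p.natAbs q.natAbs : Nat) : Int)
      = (Int.lcm p q : Int) := by
    rw [habs, pyGcd_eq, PySem.Int.floordiv_natCast, Int.lcm_def]
    rfl
  simp only [num_divisible_alt, hlcm, Fx,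
    PySem.Int.floordiv_eq_ediv_of_pos hP, PySem.Int.floordiv_eq_ediv_of_pos hQ,
    PySem.Int.floordiv_eq_ediv_of_pos hL]
  ring

-- ===== VERDICT (by name: the statement is the Claim_ definition above) =====
theorem num_divisible_spec : Claim_equal_num_divisible := by
  intro lb ub p q _ hpre
  obtain ⟨hp, hq⟩ := hpre
  unfold Spec_num_divisible
  rw [Bside lb ub p q hp hq]
  simp only [num_divisible]
  rw [show (if lb > ub then ub else lb) = (if lb ≤ ub then lb else ub) by split_ifs <;> omega,
      show (if lb > ub then lb else ub) = (if lb ≤ ub then ub else lb) by split_ifs <;> omega]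
  exact Aside p q _ _ hp hq (by split_ifs <;> omega)
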